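-- pv_equiv track=rewrite | github.com/LauriHursti/visions | py/symspell.py | buildPartialNames
-- ===== SOURCE A (Python) =====
-- def buildPartialNames(names):
--     sep = " "
--     collector = []
--     for name in names:
--         parts = name.split(sep)
--         for i in range(len(parts)):
--             selParts = parts[0:(i+1)]
--             joinedSelParts = sep.join(selParts)
--             collector.append(joinedSelParts)
--     return set(collector)
-- ===== SOURCE B (Python) =====
-- def buildPartialNames(names):
--     sep = " "
--     result = set()
--     for name in names:
--         for i, ch in enumerate(name):
--             if ch == sep:
--                 result.add(name[:i])
--         result.add(name)
--     return result
-- ===== Notes on version B (the rewrite author's own statement) =====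
-- stated objective: simpler
-- what changed: B drops split/join entirely: it scans each name once with enumerate, adding name[:i] at every separator position and the full name, instead of splitting into parts and re-joining every growing slice of the parts list.
import Mathlib
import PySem

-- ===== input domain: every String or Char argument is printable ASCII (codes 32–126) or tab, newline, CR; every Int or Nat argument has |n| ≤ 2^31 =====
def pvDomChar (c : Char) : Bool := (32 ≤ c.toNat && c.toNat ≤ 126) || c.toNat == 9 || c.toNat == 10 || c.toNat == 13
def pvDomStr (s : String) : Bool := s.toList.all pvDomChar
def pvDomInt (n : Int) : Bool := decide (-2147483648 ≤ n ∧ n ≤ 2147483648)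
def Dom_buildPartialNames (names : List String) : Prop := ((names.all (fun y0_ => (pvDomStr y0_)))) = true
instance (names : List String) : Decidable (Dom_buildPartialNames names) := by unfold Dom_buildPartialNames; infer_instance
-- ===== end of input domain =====

-- B replaces A's split-then-rejoin of every growing parts slice by a single scan that adds
-- name[:i] at each separator position plus the full name (objective: simpler).

-- ===== PORT A =====
def buildPartialNames (names : List String) : List String :=
  let sep := " "
  let collector := names.foldl (fun collector name =>
      let parts := (PySem.Str.split? name sep).getD []
      (PySem.List.pyRange 0 parts.length 1).foldl
        (fun collector i =>
          let selParts := PySem.List.slice parts (some 0) (some (i + 1))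
          let joinedSelParts := PySem.Str.join sep selParts
          collector ++ [joinedSelParts]) collector) []
  PySem.Set.ofList collector

-- ===== PORT B =====
def buildPartialNames_alt (names : List String) : List String :=
  names.foldl (fun result name =>
      let result := (PySem.List.enumerate name.toList 0).foldl
        (fun result p =>
          if p.2 == ' ' then PySem.Set.add result (PySem.Str.slice name none (some p.1))
          else result) result
      PySem.Set.add result name)
    PySem.Set.empty

-- ===== PRECONDITION & SPEC =====
def Spec_buildPartialNames (names : List String) (out : List String) : Prop := out = buildPartialNames_alt names
instance (names : List String) (out : List String) : Decidable (Spec_buildPartialNames names out) := by unfold Spec_buildPartialNames; infer_instance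

-- ===== CLAIM (what is proved, stated in full; the proofs are below) =====
def Claim_equal_buildPartialNames : Prop := ∀ (names : List String), Dom_buildPartialNames names → Spec_buildPartialNames names (buildPartialNames names)

-- ===== LEMMAS AND PROOFS =====

-- simple structural single-char splitter, used to characterise PySem.Chars.splitOn on " "
def split1 : List Char → List (List Char)
  | [] => [[]]
  | c :: r => if c = ' ' then [] :: split1 r else (split1 r).modifyHead (c :: ·)

-- prefixes of cs at each space position, in order
def spacePre : List Char → List (List Char)
  | [] => []
  | c :: r => (if c = ' ' then [[]] else []) ++ (spacePre r).map (c :: ·)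

lemma split1_space (r : List Char) : split1 (' ' :: r) = [] :: split1 r := by
  simp [split1]

lemma split1_nonspace (c : Char) (r : List Char) (hc : c ≠ ' ') :
    split1 (c :: r) = (split1 r).modifyHead (c :: ·) := by
  simp [split1, hc]

lemma split1_ne_nil (cs : List Char) : split1 cs ≠ [] := by
  cases cs with
  | nil => simp [split1]
  | cons c r =>
    simp only [split1]
    split_ifs
    · simp
    · cases h : split1 r with
      | nil => exact absurd h (split1_ne_nil r)
      | cons x l => simp

lemma split1_exists_cons (r : List Char) : ∃ x l, split1 r = x :: l := by
  cases h : split1 r with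
  | nil => exact absurd h (split1_ne_nil r)
  | cons x l => exact ⟨x, l, rfl⟩

lemma splitOn_go_space (fuel : Nat) :
    ∀ (l cur : List Char) (acc : List (List Char)), l.length < fuel →
      PySem.Chars.splitOn.go [' '] fuel l cur acc
        = acc.reverse ++ (split1 l).modifyHead (cur.reverse ++ ·) := by
  induction fuel with
  | zero => intro l cur acc h; omega
  | succ f ih =>
    intro l cur acc h
    cases l with
    | nil =>
      simp [PySem.Chars.splitOn.go, split1]
    | cons c rest =>
      rw [PySem.Chars.splitOn.go]
      by_cases hc : c = ' '
      · have hpre : List.isPrefixOf [' '] (c :: rest) = true := by simp [hc, List.isPrefixOf]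
        rw [if_pos hpre]
        have hd : List.drop [' '].length (c :: rest) = rest := rfl
        rw [hd]
        have hrec := ih rest [] ((cur.reverse) :: acc) (by simpa using Nat.lt_of_succ_lt_succ h)
        simp only [List.reverse_nil] at hrec
        rw [hrec]
        have hid : (split1 rest).modifyHead (fun x => [] ++ x) = split1 rest := by
          cases split1 rest <;> simp
        rw [hid]
        subst hc
        rw [split1_space]
        simp
      · have hpre : List.isPrefixOf [' '] (c :: rest) = false := by
          simp [List.isPrefixOf]; exact fun h' => absurd h'.symm hc
        rw [if_neg (by simp [hpre])]
        have hrec := ih rest (c :: cur) acc (by simpa using Nat.lt_of_succ_lt_succ h)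
        rw [hrec, split1_nonspace c rest hc]
        obtain ⟨x, l, hxl⟩ := split1_exists_cons rest
        simp [hxl, List.modifyHead]

lemma splitOn_space (cs : List Char) : PySem.Chars.splitOn cs [' '] = split1 cs := by
  unfold PySem.Chars.splitOn
  rw [splitOn_go_space (cs.length + 1) cs [] [] (by omega)]
  obtain ⟨x, l, hxl⟩ := split1_exists_cons cs
  simp [hxl]

-- join of a head-modified cons
lemma join_cons_head (c : Char) (x : List Char) (rest : List (List Char)) :
    PySem.Chars.join [' '] ((c :: x) :: rest) = c :: PySem.Chars.join [' '] (x :: rest) := by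
  cases rest with
  | nil => simp [PySem.Chars.join_singleton]
  | cons q r => rw [PySem.Chars.join_cons_cons, PySem.Chars.join_cons_cons]; simp

-- the char-level sequence A appends for one name
def AseqC (cs : List Char) : List (List Char) :=
  (List.range (split1 cs).length).map (fun j => PySem.Chars.join [' '] ((split1 cs).take (j + 1)))

lemma AseqC_eq (cs : List Char) : AseqC cs = spacePre cs ++ [cs] := by
  induction cs with
  | nil => simp [AseqC, split1, spacePre, PySem.Chars.join_singleton]
  | cons c r ih =>
    obtain ⟨x, l, hxl⟩ := split1_exists_cons r
    by_cases hc : c = ' '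
    · subst hc
      have hA : AseqC (' ' :: r) = [] :: (AseqC r).map (' ' :: ·) := by
        unfold AseqC
        rw [split1_space, List.length_cons, List.range_succ_eq_map, List.map_cons,
          List.map_map, List.map_map]
        refine List.cons_eq_cons.mpr ⟨by simp [PySem.Chars.join_singleton], ?_⟩
        apply List.map_congr_left
        intro j _
        simp only [Function.comp_apply]
        rw [show (j + 1 + 1) = (j + 1) + 1 from rfl, List.take_succ_cons, hxl,
          List.take_succ_cons, PySem.Chars.join_cons_cons, ← List.take_succ_cons, ← hxl]
        simp
      rw [hA, ih]
      simp [spacePre]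
    · have hA : AseqC (c :: r) = (AseqC r).map (c :: ·) := by
        unfold AseqC
        rw [split1_nonspace c r hc, hxl, List.modifyHead, List.length_cons, List.map_map]
        refine List.map_congr_left ?_
        intro j _
        simp only [Function.comp_apply, List.take_succ_cons]
        exact join_cons_head c x (l.take j)
      rw [hA, ih]
      simp [spacePre, if_neg hc]

-- conditional Set.add fold = Set.add fold over the filtered mapped list
lemma foldl_if_add {α : Type} (l : List α) (p : α → Bool) (f : α → String) (s : PySem.Set String) :
    l.foldl (fun r x => if p x then PySem.Set.add r (f x) else r) s
      = List.foldl PySem.Set.add s ((l.filter p).map f) := by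
  induction l generalizing s with
  | nil => rfl
  | cons x xs ih =>
    by_cases h : p x <;> simp [h, ih]

-- the filtered enumerate yields exactly the spacePre prefixes (of pre ++ cs, as takes)
lemma enum_spacePre (cs : List Char) : ∀ (pre : List Char),
    (((PySem.List.enumerate cs (pre.length : Int)).filter (fun p => p.2 == ' ')).map
        (fun p => (pre ++ cs).take p.1.toNat))
      = (spacePre cs).map (pre ++ ·) := by
  induction cs with
  | nil => intro pre; simp [PySem.List.enumerate, spacePre]
  | cons c r ih =>
    intro pre
    rw [PySem.List.enumerate_cons]
    have hrec := ih (pre ++ [c])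
    have hlen : ((pre ++ [c]).length : Int) = (pre.length : Int) + 1 := by simp
    rw [hlen] at hrec
    have happ : (pre ++ [c]) ++ r = pre ++ c :: r := by simp
    rw [happ] at hrec
    by_cases hc : c = ' '
    · subst hc
      simp only [List.filter_cons, beq_self_eq_true, if_true, List.map_cons]
      rw [hrec]
      simp [spacePre, List.map_map, Function.comp]
    · have hcb : ((c == ' ') = false) := by simp [hc]
      simp only [List.filter_cons, hcb, Bool.false_eq_true, reduceIte]
      rw [hrec]
      simp [spacePre, hc, List.map_map, Function.comp]

-- pyRange 0 n 1 is range n, cast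
lemma pyRange_zero_nat (n : Nat) : PySem.List.pyRange 0 (n : Int) 1 = (List.range n).map (Nat.cast) := by
  induction n with
  | zero =>
    have : ¬ ((0:Int) < 0) := by omega
    simp [PySem.List.pyRange]
  | succ m ih =>
    have hcast : (((m + 1 : Nat)) : Int) = (m : Int) + 1 := by push_cast; ring
    rw [hcast]
    rw [PySem.List.pyRange_one_append 0 (m : Int) ((m : Int) + 1) (by omega) (by omega)]
    rw [PySem.List.pyRange_one_cons (by omega : (m:Int) < (m:Int) + 1)]
    have hnil : PySem.List.pyRange ((m : Int) + 1) ((m:Int) + 1) 1 = [] := by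
      simp [PySem.List.pyRange]
    rw [hnil, ih, List.range_succ]
    simp

-- plain append-fold is map
lemma foldl_push {α β : Type} (l : List α) (f : α → β) (acc : List β) :
    l.foldl (fun acc x => acc ++ [f x]) acc = acc ++ l.map f := by
  induction l generalizing acc with
  | nil => simp
  | cons x xs ih => simp [ih]

-- what A's inner loop appends for one name, as strings
lemma A_inner (name : String) (collector : List String) :
    (PySem.List.pyRange 0 (((PySem.Str.split? name " ").getD []).length) 1).foldl
        (fun collector i =>
          collector ++ [PySem.Str.join " "
            (PySem.List.slice ((PySem.Str.split? name " ").getD []) (some 0) (some (i + 1)))])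
        collector
      = collector ++ (AseqC name.toList).map String.ofList := by
  have hsplit : (PySem.Str.split? name " ").getD [] = (split1 name.toList).map String.ofList := by
    unfold PySem.Str.split?
    have : (" ".toList) = [' '] := rfl
    simp [PySem.Chars.split?, this, splitOn_space]
  rw [hsplit, List.length_map, pyRange_zero_nat, List.foldl_map, foldl_push]
  congr 1
  unfold AseqC
  simp only [List.map_map]
  apply List.map_congr_left
  intro j _
  simp only [Function.comp_apply]
  have h0 : ((0:Int) = ((0:Nat) : Int)) := rfl
  have h1 : ((j : Int) + 1) = (((j + 1 : Nat)) : Int) := by push_cast; ring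
  rw [h0, h1, PySem.List.slice_natCast]
  simp only [List.drop_zero, Nat.sub_zero]
  apply String.toList_injective
  rw [PySem.Str.toList_join]
  have hsep : (" ".toList) = [' '] := rfl
  rw [hsep, ← List.map_take, List.map_map]
  simp only [String.toList_ofList]
  have hid : String.toList ∘ String.ofList = (id : List Char → List Char) := by
    funext t; simp
  rw [hid, List.map_id]

-- what B's inner loop does for one name
lemma B_inner (name : String) (s : PySem.Set String) :
    PySem.Set.add
        ((PySem.List.enumerate name.toList 0).foldl
          (fun result p =>
            if p.2 == ' ' then PySem.Set.add result (PySem.Str.slice name none (some p.1))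
            else result) s)
        name
      = List.foldl PySem.Set.add s ((AseqC name.toList).map String.ofList) := by
  rw [foldl_if_add]
  have hmap : ((PySem.List.enumerate name.toList 0).filter (fun p => p.2 == ' ')).map
        (fun p => PySem.Str.slice name none (some p.1))
      = (spacePre name.toList).map String.ofList := by
    have hfn : ∀ p ∈ (PySem.List.enumerate name.toList 0).filter (fun p => p.2 == ' '),
        PySem.Str.slice name none (some p.1) = String.ofList (name.toList.take p.1.toNat) := by
      intro p hp
      have hmem := (List.mem_filter.mp hp).1
      obtain ⟨k, hk, hpk⟩ := (PySem.List.mem_enumerate_iff _ _ _).mp hmem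
      apply String.toList_injective
      rw [PySem.Str.toList_slice, PySem.Chars.slice_eq_listSlice]
      subst hpk
      have hidx : (0 : Int) + (k : Int) = ((k : Nat) : Int) := by omega
      rw [hidx, PySem.List.slice_to_natCast]
      simp
    rw [List.map_congr_left hfn]
    have hcomp : (fun (p : Int × Char) => String.ofList (name.toList.take p.1.toNat))
        = String.ofList ∘ (fun (p : Int × Char) => name.toList.take p.1.toNat) := rfl
    rw [hcomp, ← List.map_map]
    have hsp := enum_spacePre name.toList []
    simp only [List.length_nil, Nat.cast_zero, List.nil_append] at hsp
    rw [hsp]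
    simp
  rw [hmap, AseqC_eq]
  simp only [List.map_append, List.map_singleton, List.foldl_append, List.foldl_cons,
    List.foldl_nil]
  congr 1
  apply String.toList_injective
  simp

-- outer assembly: A's collector is the flatten of per-name sequences
lemma A_collector (names : List String) (c0 : List String) :
    names.foldl (fun collector name =>
        (PySem.List.pyRange 0 (((PySem.Str.split? name " ").getD []).length) 1).foldl
          (fun collector i =>
            collector ++ [PySem.Str.join " "
              (PySem.List.slice ((PySem.Str.split? name " ").getD []) (some 0) (some (i + 1)))])
          collector) c0
      = c0 ++ (names.map (fun name => (AseqC name.toList).map String.ofList)).flatten := by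
  induction names generalizing c0 with
  | nil => simp
  | cons n ns ih =>
    simp only [List.foldl_cons, List.map_cons, List.flatten_cons]
    rw [A_inner, ih]
    simp

lemma B_outer (names : List String) : ∀ (s : PySem.Set String),
    names.foldl (fun result name =>
        PySem.Set.add
          ((PySem.List.enumerate name.toList 0).foldl
            (fun result p =>
              if p.2 == ' ' then PySem.Set.add result (PySem.Str.slice name none (some p.1))
              else result) result)
          name) s
      = names.foldl (fun b name =>
          List.foldl PySem.Set.add b ((AseqC name.toList).map String.ofList)) s := by
  induction names with
  | nil => intro s; rfl
  | cons n ns ih =>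
    intro s
    simp only [List.foldl_cons]
    rw [B_inner, ih]

theorem buildPartialNames_eq_alt (names : List String) :
    buildPartialNames names = buildPartialNames_alt names := by
  unfold buildPartialNames buildPartialNames_alt
  dsimp only
  rw [A_collector names []]
  rw [List.nil_append, PySem.Set.ofList_eq_foldl, List.foldl_flatten, List.foldl_map]
  rw [B_outer]
  rfl

-- ===== VERDICT (by name: the statement is the Claim_ definition above) =====
theorem buildPartialNames_spec : Claim_equal_buildPartialNames := by
  intro names _
  unfold Spec_buildPartialNames
  exact buildPartialNames_eq_alt names
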